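-- pv_equiv track=rewrite | github.com/asheuh/pyalgorithms | testing/test.py | gray_binary_code_generation
-- ===== SOURCE A (Python) =====
-- def gray_binary_code_generation(a, p):
--     l = len(a)
--     n = l - 1
--     x = [0] * n
--     f = [j for j in range(l)]
--
--     r = list()
--
--     while n:
--         m = [0] + x
--         s = [a[i] for i in range(l) if m[i] == 1]
--
--         k = [a[0]] + s
--
--         r.append(s)
--         r.append(k)
--
--         j = f[0]
--         f[0] = 0
--
--         if j == n:
--             break
--
--         f[j] = f[j + 1]
--         f[j + 1] = j + 1
--
--         x[j] = 1 - x[j]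
--
--
-- #     rn = list()
-- #
-- #     for i in r:
-- #         j = 0
-- #         y = len(i)
-- #         if y == l:
-- #             continue
-- #
-- #         if y > 1:
-- #             A = i[j]
-- #             B = i[j + 1]
-- #             if (A % p) + (B % p) == p:
-- #                 rn.append(y)
--     return r
-- ===== SOURCE B (Python) =====
-- def gray_binary_code_generation(a, p):
--     n = len(a) - 1
--     r = []
--     for i in range(2 ** n if n > 0 else 0):
--         g = i ^ (i >> 1)
--         s = [a[j + 1] for j in range(n) if (g >> j) & 1]
--         r.append(s)
--         r.append([a[0]] + s)
--     return r
-- ===== Notes on version B (the rewrite author's own statement) =====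
-- stated objective: alternative
-- what changed: Replaces the stateful loopless focus-pointer (Knuth Algorithm L style) Gray-code generator, which maintains mutable bit and focus arrays, with a stateless enumeration that derives each visited subset directly from the closed-form binary-reflected Gray code g = i ^ (i >> 1).
-- outside the precondition, e.g. on gray_binary_code_generation([], 0): A raises IndexError, B returns []
import Mathlib
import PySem

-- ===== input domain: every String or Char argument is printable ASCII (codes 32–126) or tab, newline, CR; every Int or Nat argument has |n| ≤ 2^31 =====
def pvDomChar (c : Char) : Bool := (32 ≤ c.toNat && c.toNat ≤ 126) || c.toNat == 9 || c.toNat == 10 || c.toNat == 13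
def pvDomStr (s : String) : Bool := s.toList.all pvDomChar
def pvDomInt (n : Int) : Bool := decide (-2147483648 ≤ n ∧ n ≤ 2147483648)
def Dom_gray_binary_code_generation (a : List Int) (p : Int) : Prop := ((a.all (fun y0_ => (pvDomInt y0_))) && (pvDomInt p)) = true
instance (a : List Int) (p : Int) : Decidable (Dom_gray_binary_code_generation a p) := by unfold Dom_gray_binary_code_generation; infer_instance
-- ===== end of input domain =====

-- B replaces A's stateful loopless focus-pointer Gray-code generator by a stateless
-- enumeration from the closed form g = i ^ (i >> 1) (alternative algorithm, same cost).

-- ===== PORT A =====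
-- A's while-loop: `while n:` with a break.  n is constant inside the loop, so the loop
-- runs only if n ≠ 0, and the break provably fires after exactly 2^n visits; the fuel
-- 2^n only makes that same computation total.  Internal indices (values of f, 0..n) are
-- kept as Nat; they are provably in range, so getD/set match Python's indexing exactly.
def grayLoopA (a : List Int) (l n : Nat) : Nat → List Nat → List Nat → List (List Int) → List (List Int)
  | 0, _, _, r => r
  | fuel+1, x, f, r =>
    let m : List Nat := 0 :: x
    let s : List Int := ((List.range l).filter (fun i => m.getD i 0 == 1)).map (fun i => a.getD i 0)
    let k : List Int := a.getD 0 0 :: s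
    let r' := r ++ [s, k]
    let j := f.getD 0 0
    let f1 := f.set 0 0
    if j = n then r'
    else
      let f2 := (f1.set j (f1.getD (j+1) 0)).set (j+1) (j+1)
      let x' := x.set j (1 - x.getD j 0)
      grayLoopA a l n fuel x' f2 r'

def gray_binary_code_generation (a : List Int) (p : Int) : List (List Int) :=
  let l := a.length
  let n := l - 1
  if n = 0 then [] else grayLoopA a l n (2 ^ n) (List.replicate n 0) (List.range l) []

-- ===== PORT B =====
def grayStepB (a : List Int) (n : Nat) (r : List (List Int)) (i : Nat) : List (List Int) :=
  let g := i ^^^ (i >>> 1)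
  let s : List Int := ((List.range n).filter (fun j => g.testBit j)).map (fun j => a.getD (j+1) 0)
  r ++ [s, a.getD 0 0 :: s]

def gray_binary_code_generation_alt (a : List Int) (p : Int) : List (List Int) :=
  let n := a.length - 1
  (List.range (if 0 < n then 2 ^ n else 0)).foldl (grayStepB a n) []

-- ===== PRECONDITION & SPEC =====
-- Pre_ excludes only the empty list, on which A raises IndexError (a[0] inside the loop).
def Pre_gray_binary_code_generation (a : List Int) (p : Int) : Prop := a ≠ []
instance (a : List Int) (p : Int) : Decidable (Pre_gray_binary_code_generation a p) := by unfold Pre_gray_binary_code_generation; infer_instance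

def pvWitness_gray_binary_code_generation : List Int × Int := ([1, 2, 3], 5)


def Spec_gray_binary_code_generation (a : List Int) (p : Int) (out : List (List Int)) : Prop := out = gray_binary_code_generation_alt a p
instance (a : List Int) (p : Int) (out : List (List Int)) : Decidable (Spec_gray_binary_code_generation a p out) := by unfold Spec_gray_binary_code_generation; infer_instance

-- ===== CLAIM (what is proved, stated in full; the proofs are below) =====
def Claim_equal_gray_binary_code_generation : Prop := ∀ (a : List Int) (p : Int), Dom_gray_binary_code_generation a p → Pre_gray_binary_code_generation a p → Spec_gray_binary_code_generation a p (gray_binary_code_generation a p)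

-- ===== LEMMAS AND PROOFS =====

-- number of trailing one bits
def ton (m : Nat) : Nat :=
  if h : m % 2 = 1 then ton (m / 2) + 1 else 0
decreasing_by omega

theorem ton_even {m : Nat} (h : m % 2 = 0) : ton m = 0 := by
  rw [ton]; simp [h]

theorem ton_odd {m : Nat} (h : m % 2 = 1) : ton m = ton (m / 2) + 1 := by
  rw [ton]; simp [h]

-- bits below ton are 1
theorem testBit_lt_ton : ∀ (x m : Nat), m < ton x → x.testBit m = true := by
  intro x
  induction x using Nat.strong_induction_on with
  | _ x ih =>
    intro m hm
    rcases Nat.even_or_odd x with he | ho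
    · rw [ton_even (Nat.even_iff.mp he)] at hm; omega
    · have hx1 : x % 2 = 1 := Nat.odd_iff.mp ho
      rw [ton_odd hx1] at hm
      cases m with
      | zero => simp [Nat.testBit_zero, hx1]
      | succ m =>
        rw [Nat.testBit_succ]
        exact ih (x / 2) (by omega) m (by omega)

-- the bit at ton is 0
theorem testBit_ton : ∀ (x : Nat), x.testBit (ton x) = false := by
  intro x
  induction x using Nat.strong_induction_on with
  | _ x ih =>
    rcases Nat.even_or_odd x with he | ho
    · have hx0 : x % 2 = 0 := Nat.even_iff.mp he
      rw [ton_even hx0, Nat.testBit_zero]; simp [hx0]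
    · have hx1 : x % 2 = 1 := Nat.odd_iff.mp ho
      rw [ton_odd hx1, Nat.testBit_succ]
      rcases Nat.eq_zero_or_pos x with h0 | hp
      · simp [h0] at hx1
      · exact ih (x / 2) (by omega)

-- bits of x+1 in terms of bits of x
theorem bits_succ : ∀ (x m : Nat),
    (x + 1).testBit m = (if m < ton x then false else if m = ton x then true else x.testBit m) := by
  intro x
  induction x using Nat.strong_induction_on with
  | _ x ih =>
    intro m
    rcases Nat.even_or_odd x with he | ho
    · have hx0 : x % 2 = 0 := Nat.even_iff.mp he
      rw [ton_even hx0]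
      cases m with
      | zero => simp [Nat.testBit_zero]; omega
      | succ m =>
        rw [Nat.testBit_succ, Nat.testBit_succ]
        have : (x + 1) / 2 = x / 2 := by omega
        simp [this]
    · have hx1 : x % 2 = 1 := Nat.odd_iff.mp ho
      rw [ton_odd hx1]
      cases m with
      | zero =>
        simp [Nat.testBit_zero]
        omega
      | succ m =>
        rw [Nat.testBit_succ, Nat.testBit_succ]
        have h2 : (x + 1) / 2 = x / 2 + 1 := by omega
        rw [h2, ih (x / 2) (by omega) m]
        split_ifs <;> first | rfl | omega

-- (x >>> i) % 2 in terms of the bit at i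
theorem shift_mod2 (x i : Nat) : (x >>> i) % 2 = (if x.testBit i = true then 1 else 0) := by
  have h : (x >>> i).testBit 0 = x.testBit i := by rw [Nat.testBit_shiftRight, Nat.add_zero]
  rw [Nat.testBit_zero] at h
  by_cases hb : x.testBit i = true
  · rw [hb] at h
    rw [if_pos hb]
    exact of_decide_eq_true h
  · have hbf : x.testBit i = false := by
      cases hx : x.testBit i
      · rfl
      · exact absurd hx hb
    rw [hbf] at h
    rw [if_neg hb]
    have h2 := of_decide_eq_false h
    omega

theorem shift_succ_high {x i : Nat} (h : ton x < i) : (x + 1) >>> i = x >>> i := by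
  apply Nat.eq_of_testBit_eq
  intro m
  rw [Nat.testBit_shiftRight, Nat.testBit_shiftRight, bits_succ]
  rw [if_neg (by omega : ¬ (i + m < ton x)), if_neg (by omega : ¬ (i + m = ton x))]

theorem shift_succ_at (x : Nat) : (x + 1) >>> (ton x) = (x >>> ton x) + 1 := by
  apply Nat.eq_of_testBit_eq
  intro m
  have hy0 : (x >>> ton x) % 2 = 0 := by rw [shift_mod2, testBit_ton]; simp
  rw [Nat.testBit_shiftRight, bits_succ, bits_succ, ton_even hy0]
  cases m with
  | zero =>
    rw [if_neg (by omega : ¬ (ton x + 0 < ton x)), if_pos (by omega : ton x + 0 = ton x),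
      if_neg (by omega : ¬ ((0:Nat) < 0)), if_pos rfl]
  | succ m =>
    rw [if_neg (by omega : ¬ (ton x + (m+1) < ton x)), if_neg (by omega : ¬ (ton x + (m+1) = ton x)),
      if_neg (by omega : ¬ (m+1 < 0)), if_neg (by omega : ¬ (m+1 = 0)), Nat.testBit_shiftRight]

theorem ton_two_pow_sub_one : ∀ (n : Nat), ton (2 ^ n - 1) = n := by
  intro n
  induction n with
  | zero => simpa using ton_even (m := 0) rfl
  | succ n ih =>
    have h2 : 2 ^ (n+1) = 2 * 2 ^ n := by ring
    have hpos : 0 < 2 ^ n := Nat.pow_pos (by norm_num)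
    have hodd : (2 ^ (n+1) - 1) % 2 = 1 := by omega
    rw [ton_odd hodd]
    have : (2 ^ (n+1) - 1) / 2 = 2 ^ n - 1 := by omega
    rw [this, ih]

theorem ton_lt_of_ne {x n : Nat} (hx : x < 2 ^ n) (hne : x ≠ 2 ^ n - 1) : ton x < n := by
  by_contra h
  have h' : n ≤ ton x := Nat.le_of_not_lt h
  -- all bits < n are 1, hence x ≥ 2^n - 1
  have hall : ∀ m < n, x.testBit m = true := fun m hm => testBit_lt_ton x m (by omega)
  have : 2 ^ n - 1 ≤ x := by
    have h1 : (2 ^ n - 1) &&& x = 2 ^ n - 1 := by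
      apply Nat.eq_of_testBit_eq
      intro m
      rw [Nat.testBit_and]
      by_cases hm : m < n
      · simp [hall m hm]
      · have : (2 ^ n - 1).testBit m = false := by
          apply Nat.testBit_eq_false_of_lt
          calc 2 ^ n - 1 < 2 ^ n := by omega
            _ ≤ 2 ^ m := Nat.pow_le_pow_right (by norm_num) (by omega)
        simp [this]
    calc 2 ^ n - 1 = (2 ^ n - 1) &&& x := h1.symm
      _ ≤ x := Nat.and_le_right
  omega

-- gray bit of t at position m
def grayBit (t m : Nat) : Bool := (t ^^^ (t >>> 1)).testBit m

-- closed forms for A's loop state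
def Xl (n t : Nat) : List Nat := (List.range n).map (fun j => if grayBit t j then 1 else 0)

def Ft (t j : Nat) : Nat :=
  if 1 ≤ j ∧ t.testBit (j-1) ∧ t.testBit j then j else j + ton (t >>> j)

def Fl (n t : Nat) : List Nat := (List.range (n+1)).map (Ft t)

theorem Xl_zero (n : Nat) : Xl n 0 = List.replicate n 0 := by
  unfold Xl
  apply List.ext_getElem <;> simp [grayBit]

theorem Fl_zero (n : Nat) : Fl n 0 = List.range (n+1) := by
  unfold Fl
  apply List.ext_getElem <;> simp [Ft, ton_even (m := 0) rfl]

theorem Fl_getD (n t j : Nat) (hj : j ≤ n) : (Fl n t).getD j 0 = Ft t j := by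
  unfold Fl
  rw [List.getD_eq_getElem?_getD, List.getElem?_map]
  simp [List.getElem?_range (by omega : j < n + 1)]

theorem Ft_zero (t : Nat) : Ft t 0 = ton t := by simp [Ft]

theorem grayBit_eq (t m : Nat) : grayBit t m = (t.testBit m != t.testBit (m+1)) := by
  unfold grayBit
  rw [Nat.testBit_xor, Nat.testBit_shiftRight, Nat.add_comm 1 m]

-- the grayBit flip at position ton t
theorem grayBit_succ (t m : Nat) :
    grayBit (t+1) m = (if m = ton t then !(grayBit t m) else grayBit t m) := by
  rw [grayBit_eq, grayBit_eq, bits_succ, bits_succ]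
  rcases Nat.lt_trichotomy m (ton t) with h | h | h
  · rw [if_pos h, if_neg (by omega : ¬ m = ton t), testBit_lt_ton t m h]
    rcases (by omega : m + 1 < ton t ∨ m + 1 = ton t) with h1 | h1
    · rw [if_pos h1, testBit_lt_ton t (m+1) h1]
      rfl
    · rw [if_neg (by omega : ¬ (m + 1 < ton t)), if_pos h1,
        show t.testBit (m+1) = false from h1 ▸ testBit_ton t]
      rfl
  · rw [if_neg (by omega : ¬ m < ton t), if_pos h, if_neg (by omega : ¬ (m + 1 < ton t)),
      if_neg (by omega : ¬ (m + 1 = ton t)), if_pos h,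
      show t.testBit m = false from h ▸ testBit_ton t]
    cases t.testBit (m+1) <;> rfl
  · rw [if_neg (by omega : ¬ m < ton t), if_neg (by omega : ¬ m = ton t),
      if_neg (by omega : ¬ (m + 1 < ton t)), if_neg (by omega : ¬ (m + 1 = ton t)),
      if_neg (by omega : ¬ m = ton t)]

-- X transition
theorem Xl_succ (n t : Nat) (hj : ton t < n) :
    Xl n (t+1) = (Xl n t).set (ton t) (1 - (Xl n t).getD (ton t) 0) := by
  have hget : (Xl n t).getD (ton t) 0 = (if grayBit t (ton t) then 1 else 0) := by
    unfold Xl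
    rw [List.getD_eq_getElem?_getD, List.getElem?_map]
    simp [List.getElem?_range hj]
  apply List.ext_getElem
  · simp [Xl]
  · intro i hi _
    simp only [Xl, List.getElem_map, List.getElem_range] at *
    rw [List.getElem_set]
    by_cases h : ton t = i
    · subst h
      simp only [if_pos rfl, hget, grayBit_succ, if_pos rfl]
      cases grayBit t (ton t) <;> simp
    · simp only [if_neg h, List.getElem_map, List.getElem_range, grayBit_succ,
        if_neg (by omega : i ≠ ton t)]

-- F transition, pointwise
theorem Ft_succ (t n i : Nat) (hj : ton t < n) (hi : i ≤ n) :
    Ft (t+1) i = (if i = ton t + 1 then ton t + 1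
                  else if i = ton t then Ft t (ton t + 1)
                  else if i = 0 then 0 else Ft t i) := by
  have hbj : (t+1).testBit (ton t) = true := by
    rw [bits_succ, if_neg (by omega : ¬ (ton t < ton t)), if_pos rfl]
  by_cases h1 : i = ton t + 1
  · subst h1
    rw [if_pos rfl]
    unfold Ft
    simp only [Nat.add_sub_cancel]
    by_cases h2 : t.testBit (ton t + 1) = true
    · have hb2 : (t+1).testBit (ton t + 1) = true := by
        rw [bits_succ, if_neg (by omega : ¬ (ton t + 1 < ton t)),
          if_neg (by omega : ¬ (ton t + 1 = ton t))]
        exact h2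
      simp [hbj, hb2, Nat.le_add_left]
    · have hb2 : (t+1).testBit (ton t + 1) = false := by
        rw [bits_succ, if_neg (by omega : ¬ (ton t + 1 < ton t)),
          if_neg (by omega : ¬ (ton t + 1 = ton t))]
        simpa using h2
      have hsh : (t+1) >>> (ton t + 1) = t >>> (ton t + 1) := shift_succ_high (by omega)
      have he : (t >>> (ton t + 1)) % 2 = 0 := by rw [shift_mod2]; simp [h2]
      simp [hb2, hsh, ton_even he]
  · by_cases h2 : i = ton t
    · subst h2
      rw [if_neg h1, if_pos rfl]
      have hL : Ft (t+1) (ton t) = ton t + ton ((t+1) >>> ton t) := by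
        unfold Ft
        have hcond : ¬ (1 ≤ ton t ∧ (t+1).testBit (ton t - 1) = true ∧ (t+1).testBit (ton t) = true) := by
          rintro ⟨ha, hbm, _⟩
          rw [bits_succ, if_pos (by omega : ton t - 1 < ton t)] at hbm
          exact absurd hbm (by simp)
        rw [if_neg hcond]
      have hR : Ft t (ton t + 1) = (ton t + 1) + ton (t >>> (ton t + 1)) := by
        unfold Ft
        rw [show ton t + 1 - 1 = ton t from by omega, testBit_ton t]
        simp
      rw [hL, hR, shift_succ_at t]
      have hy0 : (t >>> ton t) % 2 = 0 := by rw [shift_mod2, testBit_ton]; simp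
      rw [ton_odd (by omega : ((t >>> ton t) + 1) % 2 = 1)]
      rw [show ((t >>> ton t) + 1) / 2 = (t >>> ton t) / 2 by omega]
      rw [show (t >>> ton t) / 2 = t >>> (ton t + 1) from by rw [Nat.shiftRight_succ]]
      omega
    · by_cases h3 : i = 0
      · subst h3
        rw [if_neg h1, if_neg h2, if_pos rfl]
        have he2 : (t+1) % 2 = 0 := by
          have hb0 : (t+1).testBit 0 = false := by
            rw [bits_succ, if_pos (by omega : 0 < ton t)]
          rw [Nat.testBit_zero] at hb0
          simp at hb0
          omega
        simp [Ft, Nat.shiftRight_zero, ton_even he2]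
      · rw [if_neg h1, if_neg h2, if_neg h3]
        by_cases h4 : i < ton t
        · have hbt1 : t.testBit (i-1) = true := testBit_lt_ton t _ (by omega)
          have hbt2 : t.testBit i = true := testBit_lt_ton t _ (by omega)
          have hbs : (t+1).testBit i = false := by rw [bits_succ, if_pos h4]
          have he : ((t+1) >>> i) % 2 = 0 := by rw [shift_mod2]; simp [hbs]
          simp [Ft, hbs, hbt1, hbt2, ton_even he, (by omega : 1 ≤ i)]
        · have h5 : ton t + 1 < i := by omega
          have hbi : (t+1).testBit i = t.testBit i := by
            rw [bits_succ, if_neg (by omega : ¬ (i < ton t)), if_neg (by omega : ¬ (i = ton t))]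
          have hbi1 : (t+1).testBit (i-1) = t.testBit (i-1) := by
            rw [bits_succ, if_neg (by omega : ¬ (i - 1 < ton t)), if_neg (by omega : ¬ (i - 1 = ton t))]
          unfold Ft
          rw [hbi, hbi1, shift_succ_high (by omega : ton t < i)]

theorem Fl_succ (n t : Nat) (hj : ton t < n) :
    Fl n (t+1) =
      (((Fl n t).set 0 0).set (ton t) (((Fl n t).set 0 0).getD (ton t + 1) 0)).set (ton t + 1) (ton t + 1) := by
  have hget : ((Fl n t).set 0 0).getD (ton t + 1) 0 = Ft t (ton t + 1) := by
    rw [List.getD_eq_getElem?_getD, List.getElem?_set]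
    rw [if_neg (by omega : ¬ (0 = ton t + 1))]
    rw [← List.getD_eq_getElem?_getD, Fl_getD n t (ton t + 1) (by omega)]
  rw [hget]
  apply List.ext_getElem
  · simp [Fl]
  · intro i hi hi2
    have hin : i ≤ n := by
      have h := hi
      simp only [Fl, List.length_map, List.length_range] at h
      omega
    have hFl1 : (Fl n (t+1))[i]'hi = Ft (t+1) i := by simp [Fl]
    rw [hFl1, Ft_succ t n i hj hin]
    rw [List.getElem_set, List.getElem_set, List.getElem_set]
    by_cases h1 : i = ton t + 1
    · rw [if_pos (by omega : ton t + 1 = i), if_pos h1]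
    · rw [if_neg (by omega : ¬ (ton t + 1 = i)), if_neg h1]
      by_cases h2 : i = ton t
      · rw [if_pos (by omega : ton t = i), if_pos h2]
      · rw [if_neg (by omega : ¬ (ton t = i)), if_neg h2]
        by_cases h3 : i = 0
        · rw [if_pos (by omega : 0 = i), if_pos h3]
        · rw [if_neg (by omega : ¬ (0 = i)), if_neg h3]
          simp [Fl]

-- the visited subset of A equals the gray-code subset of B
theorem s_eq (a : List Int) (n t : Nat) (hl : a.length = n + 1) :
    ((List.range (n+1)).filter (fun i => (0 :: Xl n t).getD i 0 == 1)).map (fun i => a.getD i 0)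
    = ((List.range n).filter (fun j => (t ^^^ (t >>> 1)).testBit j)).map (fun j => a.getD (j+1) 0) := by
  rw [List.range_succ_eq_map]
  rw [List.filter_cons]
  have h0 : ((0 :: Xl n t).getD 0 0 == 1) = false := by simp
  rw [h0]
  simp only [Bool.false_eq_true, if_false]
  rw [List.filter_map, List.map_map]
  have hpred : ∀ j ∈ List.range n,
      ((fun i => (0 :: Xl n t).getD i 0 == 1) ∘ Nat.succ) j = (t ^^^ (t >>> 1)).testBit j := by
    intro j hj
    have hjn : j < n := List.mem_range.mp hj
    show ((0 :: Xl n t).getD (j+1) 0 == 1) = (t ^^^ (t >>> 1)).testBit j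
    have hv : (0 :: Xl n t).getD (j+1) 0 = (if grayBit t j then 1 else 0) := by
      have h1 : (0 :: Xl n t).getD (j+1) 0 = (Xl n t).getD j 0 := by simp
      rw [h1]
      unfold Xl
      rw [List.getD_eq_getElem?_getD, List.getElem?_map, List.getElem?_range hjn]
      rfl
    rw [hv]
    unfold grayBit
    cases h : (t ^^^ (t >>> 1)).testBit j <;> simp [h]
  rw [List.filter_congr hpred]
  rfl

-- main loop lemma
theorem loop_eq (a : List Int) (n : Nat) (hl : a.length = n + 1) (hn : 0 < n) :
    ∀ (c t : Nat) (r : List (List Int)), 0 < c → t + c = 2 ^ n →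
    grayLoopA a (n+1) n c (Xl n t) (Fl n t) r = (List.range' t c).foldl (grayStepB a n) r := by
  intro c
  induction c with
  | zero => omega
  | succ c ih =>
    intro t r _ htc
    have ht : t < 2 ^ n := by omega
    rw [grayLoopA]
    simp only []
    have hgetf : (Fl n t).getD 0 0 = ton t := by
      rw [Fl_getD n t 0 (by omega), Ft_zero]
    have hs := s_eq a n t hl
    rcases Nat.eq_zero_or_pos c with hc0 | hcpos
    · -- last iteration: t = 2^n - 1, j = n, break
      subst hc0
      have htlast : t = 2 ^ n - 1 := by omega
      have hj : ton t = n := by rw [htlast]; exact ton_two_pow_sub_one n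
      rw [hgetf, hj, if_pos rfl, hs, List.range'_succ, List.range'_zero]
      simp only [List.foldl_cons, List.foldl_nil, grayStepB]
    · -- intermediate iteration: j < n
      have htne : t ≠ 2 ^ n - 1 := by omega
      have hj : ton t < n := ton_lt_of_ne ht htne
      rw [hgetf, if_neg (by omega : ¬ (ton t = n)), hs]
      rw [← Fl_succ n t hj, ← Xl_succ n t hj]
      rw [ih (t+1) _ hcpos (by omega), List.range'_succ]
      simp only [List.foldl_cons, grayStepB]

-- ===== VERDICT (by name: the statement is the Claim_ definition above) =====
theorem gray_binary_code_generation_spec : Claim_equal_gray_binary_code_generation := by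
  intro a p _ hpre
  unfold Spec_gray_binary_code_generation
  obtain ⟨n, hl⟩ : ∃ n, a.length = n + 1 := by
    cases a with
    | nil => exact absurd rfl hpre
    | cons x xs => exact ⟨xs.length, by simp⟩
  simp only [gray_binary_code_generation, gray_binary_code_generation_alt, hl, Nat.add_sub_cancel]
  rcases Nat.eq_zero_or_pos n with h0 | hpos
  · simp [h0]
  · rw [if_neg (by omega : ¬ (n = 0)), if_pos hpos]
    have hloop := loop_eq a n hl hpos (2 ^ n) 0 [] (Nat.pow_pos (by norm_num)) (by omega)
    rw [Xl_zero, Fl_zero] at hloop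
    rw [List.range_eq_range'] at hloop
    rw [List.range_eq_range', List.range_eq_range']
    exact hloop
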